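-- pv_equiv track=rewrite | github.com/utkrisht-sikka/Distributed-Systems-Projects | project/word_count_task/reducer.py | shuffle_and_sort
-- ===== SOURCE A (Python) =====
-- def shuffle_and_sort(all_partitions_content):
--     reducer_contents = {}
--     for word, cnt in all_partitions_content:
--         if word in reducer_contents.keys():
--             reducer_contents[word].append(cnt)
--         else:
--             reducer_contents[word] = [cnt]
--     reducer_contents = dict(sorted(reducer_contents.items()))
--     return reducer_contents
-- ===== SOURCE B (Python) =====
-- def shuffle_and_sort(all_partitions_content):
--     # sort first (stable, by word only), then group adjacent equal words in one pass
--     s = sorted(all_partitions_content, key=lambda p: p[0])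
--     result = {}
--     i = 0
--     n = len(s)
--     while i < n:
--         w = s[i][0]
--         counts = []
--         while i < n and s[i][0] == w:
--             counts.append(s[i][1])
--             i += 1
--         result[w] = counts
--     return result
-- ===== Notes on version B (the rewrite author's own statement) =====
-- stated objective: alternative
-- what changed: Replaces A's dict-accumulation pass followed by a final sort of the grouped items with a sort-first strategy: stable-sort the pairs by word, then collect each adjacent run of equal words in a single pass; stability keeps each word's counts in input order.
import Mathlib
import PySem

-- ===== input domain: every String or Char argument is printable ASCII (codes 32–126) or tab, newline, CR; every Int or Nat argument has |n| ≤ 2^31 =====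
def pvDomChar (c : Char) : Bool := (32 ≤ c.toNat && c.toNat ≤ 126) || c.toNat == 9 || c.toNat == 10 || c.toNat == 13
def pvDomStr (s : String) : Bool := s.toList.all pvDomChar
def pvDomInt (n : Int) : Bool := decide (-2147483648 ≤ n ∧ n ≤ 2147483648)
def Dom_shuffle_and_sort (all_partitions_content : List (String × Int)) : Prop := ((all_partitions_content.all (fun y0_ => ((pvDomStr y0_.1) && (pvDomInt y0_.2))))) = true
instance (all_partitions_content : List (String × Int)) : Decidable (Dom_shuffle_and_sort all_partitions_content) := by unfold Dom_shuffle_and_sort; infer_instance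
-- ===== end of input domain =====

-- B replaces A's dict-accumulation-then-sort with a stable sort by word followed by one
-- adjacent-grouping pass (alternative decomposition, same observable result).

-- ===== PORT A =====
-- Python A: accumulate counts per word in a dict (append, or start a fresh list), then
-- dict(sorted(d.items())). The item tuples have pairwise-distinct first components, so
-- Python's tuple comparison is decided by the word alone: sorting by the key `.1` is exact.
def shuffle_and_sort (all_partitions_content : List (String × Int)) : List (String × List Int) :=
  let reducer_contents : PySem.Dict String (List Int) :=
    all_partitions_content.foldl
      (fun d p =>
        if d.contains p.1 then d.insert p.1 (d.getD p.1 [] ++ [p.2])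
        else d.insert p.1 [p.2])
      PySem.Dict.empty
  (PySem.List.sorted reducer_contents.items (fun it => it.1))

-- ===== PORT B =====
-- one pass over the sorted list: take the run of the head's word, recurse on the rest
def pvGroupAdj : List (String × Int) → List (String × List Int)
  | [] => []
  | p :: rest =>
      (p.1, p.2 :: (rest.takeWhile (fun q => q.1 == p.1)).map Prod.snd)
        :: pvGroupAdj (rest.dropWhile (fun q => q.1 == p.1))
termination_by s => s.length
decreasing_by
  simp only [List.length_cons]
  exact Nat.lt_succ_of_le (List.length_dropWhile_le _ _)

def shuffle_and_sort_alt (all_partitions_content : List (String × Int)) : List (String × List Int) :=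
  pvGroupAdj (PySem.List.sorted all_partitions_content (fun p => p.1))

-- ===== PRECONDITION & SPEC =====
def Spec_shuffle_and_sort (all_partitions_content : List (String × Int)) (out : List (String × List Int)) : Prop := out = shuffle_and_sort_alt all_partitions_content
instance (all_partitions_content : List (String × Int)) (out : List (String × List Int)) : Decidable (Spec_shuffle_and_sort all_partitions_content out) := by unfold Spec_shuffle_and_sort; infer_instance

-- ===== CLAIM (what is proved, stated in full; the proofs are below) =====
def Claim_equal_shuffle_and_sort : Prop := ∀ (all_partitions_content : List (String × Int)), Dom_shuffle_and_sort all_partitions_content → Spec_shuffle_and_sort all_partitions_content (shuffle_and_sort all_partitions_content)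

-- ===== LEMMAS AND PROOFS =====

-- the accumulation step of A, written as Dict.modify
def pvStep (d : PySem.Dict String (List Int)) (p : String × Int) : PySem.Dict String (List Int) :=
  d.modify p.1 [] (· ++ [p.2])

lemma pvStepA_eq :
    (fun (d : PySem.Dict String (List Int)) (p : String × Int) =>
      if d.contains p.1 then d.insert p.1 (d.getD p.1 [] ++ [p.2])
      else d.insert p.1 [p.2]) = pvStep := by
  funext d p
  by_cases h : d.contains p.1 = true
  · simp only [h, if_true]
    rfl
  · have h' : d.contains p.1 = false := by simpa using h
    simp only [h', Bool.false_eq_true, if_false]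
    show d.insert p.1 [p.2] = d.modify p.1 [] (· ++ [p.2])
    have hm : d.modify p.1 [] (· ++ [p.2]) = d.insert p.1 (d.getD p.1 [] ++ [p.2]) := rfl
    rw [hm, PySem.Dict.getD_of_not_contains d [] h']
    rfl

-- dedup of an appended element
lemma pvDedup_append (l : List String) (x : String) :
    PySem.List.dedup (l ++ [x])
      = if x ∈ l then PySem.List.dedup l else PySem.List.dedup l ++ [x] := by
  simp only [PySem.List.dedup_eq_ofList]
  have h1 : PySem.Set.ofList (l ++ [x]) = PySem.Set.add (PySem.Set.ofList l) x := by
    show List.foldl PySem.Set.add [] (l ++ [x]) = _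
    rw [List.foldl_append]
    rfl
  have h2 : PySem.Set.add (PySem.Set.ofList l) x
      = if PySem.Set.contains (PySem.Set.ofList l) x then PySem.Set.ofList l
        else PySem.Set.ofList l ++ [x] := rfl
  rw [h1, h2]
  by_cases hx : x ∈ l
  · have hc : PySem.Set.contains (PySem.Set.ofList l) x = true := by
      show List.elem x (PySem.Set.ofList l) = true
      exact List.elem_iff.mpr ((PySem.Set.mem_ofList l x).mpr hx)
    simp [hx]
  · have hc : PySem.Set.contains (PySem.Set.ofList l) x = false := by
      show List.elem x (PySem.Set.ofList l) = false
      rw [Bool.eq_false_iff]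
      intro hcon
      exact hx ((PySem.Set.mem_ofList l x).mp (List.elem_iff.mp hcon))
    simp [hx]

lemma pvDedup_sublist (l : List String) : (PySem.List.dedup l).Sublist l := by
  induction l using List.reverseRecOn with
  | nil => simp [PySem.List.dedup]
  | append_singleton l x ih =>
    rw [pvDedup_append]
    by_cases hx : x ∈ l
    · simp only [hx, if_true]
      exact ih.trans (List.sublist_append_left l [x])
    · simp only [hx, if_false]
      exact List.Sublist.append ih (List.Sublist.refl [x])

lemma pvPairwise_lt_dedup (l : List String) (h : l.Pairwise (· ≤ ·)) :
    (PySem.List.dedup l).Pairwise (· < ·) := by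
  have h1 : (PySem.List.dedup l).Pairwise (· ≤ ·) :=
    List.Pairwise.sublist (pvDedup_sublist l) h
  have h2 : (PySem.List.dedup l).Pairwise (· ≠ ·) := PySem.List.nodup_dedup l
  exact (h1.and h2).imp (fun hab => lt_of_le_of_ne hab.1 hab.2)

-- the items of A's accumulated dict: distinct words in first-occurrence order, each with
-- its counts in input order
lemma pvItemsG (xs : List (String × Int)) :
    (xs.foldl pvStep PySem.Dict.empty).items
      = (PySem.List.dedup (xs.map Prod.fst)).map
          (fun w => (w, (xs.filter (fun p => p.1 == w)).map Prod.snd)) := by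
  induction xs using List.reverseRecOn with
  | nil => rfl
  | append_singleton xs p ih =>
    rw [List.foldl_append]
    have hstep : List.foldl pvStep (xs.foldl pvStep PySem.Dict.empty) [p]
        = (xs.foldl pvStep PySem.Dict.empty).insert p.1
            ((xs.foldl pvStep PySem.Dict.empty).getD p.1 [] ++ [p.2]) := rfl
    rw [hstep]
    have hgetD : (xs.foldl pvStep PySem.Dict.empty).getD p.1 []
        = (xs.filter (fun q => q.1 == p.1)).map Prod.snd := by
      have h := PySem.Dict.getD_foldl_modify_append xs PySem.Dict.empty p.1
      simpa [pvStep, PySem.Dict.getD_empty] using h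
    rw [hgetD]
    have hkeys : (xs.foldl pvStep PySem.Dict.empty).keys
        = PySem.List.dedup (xs.map Prod.fst) := by
      show ((xs.foldl pvStep PySem.Dict.empty).items).map (fun q => q.1) = _
      rw [ih, List.map_map]
      show List.map (fun w : String => w) _ = _
      simp
    have hmapapp : (xs ++ [p]).map Prod.fst = xs.map Prod.fst ++ [p.1] := by simp
    by_cases hmem : p.1 ∈ xs.map Prod.fst
    · have hcont : (xs.foldl pvStep PySem.Dict.empty).contains p.1 = true := by
        rw [PySem.Dict.contains_eq_decide_mem_keys, hkeys]
        simp [hmem]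
      rw [PySem.Dict.items_insert_of_contains _ _ hcont, ih, List.map_map,
          hmapapp, pvDedup_append, if_pos hmem]
      refine List.map_congr_left (fun w hw => ?_)
      simp only [Function.comp]
      by_cases hwp : w = p.1
      · subst hwp
        simp [List.filter_append, List.filter_cons]
      · have hb1 : (w == p.1) = false := by simpa using hwp
        have hb2 : (p.1 == w) = false := by simpa using (Ne.symm hwp)
        simp [hb1, hb2, List.filter_append, List.filter_cons]
    · have hcont : (xs.foldl pvStep PySem.Dict.empty).contains p.1 = false := by
        rw [PySem.Dict.contains_eq_decide_mem_keys, hkeys]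
        simp [hmem]
      rw [PySem.Dict.items_insert_of_not_contains _ _ hcont, ih,
          hmapapp, pvDedup_append, if_neg hmem, List.map_append]
      congr 1
      · refine List.map_congr_left (fun w hw => ?_)
        have hwne : w ≠ p.1 := by
          intro h
          subst h
          exact hmem ((PySem.List.mem_dedup _ _).mp hw)
        have hb2 : (p.1 == w) = false := by simpa using (Ne.symm hwne)
        simp [hb2, List.filter_append, List.filter_cons]
      · simp [List.filter_append, List.filter_cons]

-- stability of PySem.List.sorted: elements with a given word keep their input order
lemma pvFilter_insertBy (w : String) (x : String × Int) (acc : List (String × Int))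
    (hs : acc.Pairwise (fun a b => a.1 ≤ b.1)) :
    (PySem.List.insertBy (fun a b => decide (a.1 < b.1)) x acc).filter (fun p => p.1 == w)
      = if x.1 == w then acc.filter (fun p => p.1 == w) ++ [x]
        else acc.filter (fun p => p.1 == w) := by
  induction acc with
  | nil =>
    have h0 : PySem.List.insertBy (fun a b => decide (a.1 < b.1)) x [] = [x] := rfl
    rw [h0]
    by_cases hx : (x.1 == w) = true <;> simp [List.filter_cons, hx]
  | cons y ys ih =>
    obtain ⟨hy, hys⟩ := List.pairwise_cons.mp hs
    have hins : PySem.List.insertBy (fun a b => decide (a.1 < b.1)) x (y :: ys)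
        = if decide (x.1 < y.1) then x :: y :: ys
          else y :: PySem.List.insertBy (fun a b => decide (a.1 < b.1)) x ys := rfl
    rw [hins]
    by_cases hlt : x.1 < y.1
    · rw [if_pos (by simpa using hlt)]
      by_cases hxw : x.1 = w
      · have hbx : (x.1 == w) = true := by simp [hxw]
        have hnil : (y :: ys).filter (fun p => p.1 == w) = [] := by
          rw [List.filter_eq_nil_iff]
          intro a ha
          have hya : y.1 ≤ a.1 := by
            rcases List.mem_cons.mp ha with rfl | hmem
            · exact le_refl _
            · exact hy a hmem
          have hlt2 : w < a.1 := lt_of_lt_of_le (hxw ▸ hlt) hya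
          simp [ne_of_gt hlt2]
        rw [List.filter_cons, hnil]
        simp [hbx]
      · have hbx : (x.1 == w) = false := by simpa using hxw
        rw [List.filter_cons]
        simp [hbx]
    · rw [if_neg (by simpa using hlt)]
      rw [List.filter_cons, List.filter_cons, ih hys]
      by_cases hyw : (y.1 == w) = true <;> by_cases hxw : (x.1 == w) = true <;>
        simp [hyw, hxw]

lemma pvFilter_sorted (xs : List (String × Int)) (w : String) :
    (PySem.List.sorted xs (fun p => p.1)).filter (fun p => p.1 == w)
      = xs.filter (fun p => p.1 == w) := by
  induction xs using List.reverseRecOn with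
  | nil => rfl
  | append_singleton xs x ih =>
    have h1 : PySem.List.sorted (xs ++ [x]) (fun p : String × Int => p.1)
        = PySem.List.insertBy (fun a b => decide (a.1 < b.1)) x
            (PySem.List.sorted xs (fun p => p.1)) := by
      rw [PySem.List.sorted_eq_foldl_insertBy, PySem.List.sorted_eq_foldl_insertBy,
          List.foldl_append]
      rfl
    rw [h1, pvFilter_insertBy w x _ (PySem.List.sorted_pairwise xs _), List.filter_append]
    by_cases hx : (x.1 == w) = true <;> simp [hx, ih, List.filter_cons]

-- the two defining equations of B's grouping pass
lemma pvGroupAdj_nil : pvGroupAdj [] = [] := by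
  rw [pvGroupAdj]

lemma pvGroupAdj_cons (p : String × Int) (rest : List (String × Int)) :
    pvGroupAdj (p :: rest)
      = (p.1, p.2 :: (rest.takeWhile (fun q => q.1 == p.1)).map Prod.snd)
          :: pvGroupAdj (rest.dropWhile (fun q => q.1 == p.1)) := by
  rw [pvGroupAdj]

-- helpers for dedup over a run
lemma pvFoldlAddNop (l1 : List String) (s : PySem.Set String)
    (h : ∀ v ∈ l1, v ∈ s) : List.foldl PySem.Set.add s l1 = s := by
  induction l1 with
  | nil => rfl
  | cons v l1 ih =>
    have hmem : v ∈ s := h v List.mem_cons_self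
    have ha : PySem.Set.add s v = s := by
      show (if PySem.Set.contains s v then s else s ++ [v]) = s
      simp [hmem]
    rw [List.foldl_cons, ha]
    exact ih (fun v hv => h v (List.mem_cons_of_mem _ hv))

lemma pvFoldlAddCons (l2 : List String) (w : String) (s : List String)
    (h : ∀ v ∈ l2, v ≠ w) :
    List.foldl PySem.Set.add (w :: s) l2 = w :: List.foldl PySem.Set.add s l2 := by
  induction l2 generalizing s with
  | nil => rfl
  | cons v l2 ih =>
    have hvw : v ≠ w := h v List.mem_cons_self
    have hcons : PySem.Set.add (w :: s) v = w :: PySem.Set.add s v := by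
      show (if PySem.Set.contains (w :: s) v then w :: s else (w :: s) ++ [v])
          = w :: (if PySem.Set.contains s v then s else s ++ [v])
      by_cases hv : v ∈ s
      · simp [hv, List.mem_cons, hvw]
      · simp [hv, List.mem_cons, hvw]
    rw [List.foldl_cons, List.foldl_cons, hcons, ih _ (fun v hv => h v (List.mem_cons_of_mem _ hv))]

lemma pvDedupConsRun (w : String) (l1 l2 : List String)
    (h1 : ∀ v ∈ l1, v = w) (h2 : ∀ v ∈ l2, v ≠ w) :
    PySem.List.dedup (w :: (l1 ++ l2)) = w :: PySem.List.dedup l2 := by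
  simp only [PySem.List.dedup_eq_ofList]
  show List.foldl PySem.Set.add [] (w :: (l1 ++ l2)) = w :: List.foldl PySem.Set.add [] l2
  rw [List.foldl_cons]
  have h0 : PySem.Set.add [] w = [w] := rfl
  rw [h0, List.foldl_append,
      pvFoldlAddNop l1 [w] (fun v hv => by simp [h1 v hv]),
      pvFoldlAddCons l2 w [] h2]

-- grouping adjacent runs of a word-sorted list
lemma pvGroupAdj_eq_aux :
    ∀ (n : Nat) (s : List (String × Int)), s.length ≤ n →
      s.Pairwise (fun a b => a.1 ≤ b.1) →
      pvGroupAdj s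
        = (PySem.List.dedup (s.map Prod.fst)).map
            (fun w => (w, (s.filter (fun p => p.1 == w)).map Prod.snd)) := by
  intro n
  induction n with
  | zero =>
    intro s hl _
    have hnil : s = [] := List.eq_nil_of_length_eq_zero (Nat.le_zero.mp hl)
    subst hnil
    rw [pvGroupAdj_nil]
    rfl
  | succ n ih =>
    intro s hl hs
    cases s with
    | nil => rw [pvGroupAdj_nil]; rfl
    | cons p rest =>
      obtain ⟨hp, hrest⟩ := List.pairwise_cons.mp hs
      have htmem : ∀ a ∈ rest.takeWhile (fun q => q.1 == p.1), a.1 = p.1 := by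
        intro a ha
        have := List.mem_takeWhile_imp ha
        simpa using this
      have hrpair : (rest.dropWhile (fun q => q.1 == p.1)).Pairwise (fun a b => a.1 ≤ b.1) :=
        List.Pairwise.sublist (List.dropWhile_sublist _) hrest
      have hrgt : ∀ b ∈ rest.dropWhile (fun q => q.1 == p.1), p.1 < b.1 := by
        generalize hE : rest.dropWhile (fun q => q.1 == p.1) = r
        cases r with
        | nil => intro b hb; cases hb
        | cons a as =>
          have hhead : (a.1 == p.1) = false := by
            have h := List.head?_dropWhile_not (fun q => q.1 == p.1) rest
            rw [hE] at h
            simpa using h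
          have hsub : (a :: as).Sublist rest := hE ▸ List.dropWhile_sublist _
          have halt : p.1 < a.1 := by
            refine lt_of_le_of_ne (hp a (hsub.mem (List.mem_cons_self))) ?_
            intro hEq
            rw [← hEq] at hhead
            simp at hhead
          intro b hb
          rcases List.mem_cons.mp hb with rfl | hb'
          · exact halt
          · have hpair := List.Pairwise.sublist hsub hrest
            exact lt_of_lt_of_le halt ((List.pairwise_cons.mp hpair).1 b hb')
      have hlen : (rest.dropWhile (fun q => q.1 == p.1)).length ≤ n :=
        le_trans (List.length_dropWhile_le _ _)
          (Nat.succ_le_succ_iff.mp (by simpa using hl))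
      have hIH := ih (rest.dropWhile (fun q => q.1 == p.1)) hlen hrpair
      have hd : PySem.List.dedup ((p :: rest).map Prod.fst)
          = p.1 :: PySem.List.dedup ((rest.dropWhile (fun q => q.1 == p.1)).map Prod.fst) := by
        have hsplit : (p :: rest).map Prod.fst
            = p.1 :: ((rest.takeWhile (fun q => q.1 == p.1)).map Prod.fst
                ++ (rest.dropWhile (fun q => q.1 == p.1)).map Prod.fst) := by
          rw [← List.map_append, List.takeWhile_append_dropWhile]
          rfl
        rw [hsplit]
        exact pvDedupConsRun _ _ _
          (fun v hv => by
            obtain ⟨a, ha, rfl⟩ := List.mem_map.mp hv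
            exact htmem a ha)
          (fun v hv => by
            obtain ⟨a, ha, rfl⟩ := List.mem_map.mp hv
            exact ne_of_gt (hrgt a ha))
      have hfilt_head : (p :: rest).filter (fun q => q.1 == p.1)
          = p :: rest.takeWhile (fun q => q.1 == p.1) := by
        rw [List.filter_cons]
        simp only [beq_self_eq_true, if_true]
        congr 1
        conv_lhs => rw [← List.takeWhile_append_dropWhile (p := fun q => q.1 == p.1) (l := rest)]
        rw [List.filter_append,
            List.filter_eq_self.mpr (fun a ha => by simp [htmem a ha]),
            List.filter_eq_nil_iff.mpr (fun a ha => by simpa using ne_of_gt (hrgt a ha)),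
            List.append_nil]
      rw [pvGroupAdj_cons, hIH, hd, List.map_cons]
      congr 1
      · rw [hfilt_head, List.map_cons]
      · refine List.map_congr_left (fun w hw => ?_)
        have hwmem : w ∈ (rest.dropWhile (fun q => q.1 == p.1)).map Prod.fst :=
          (PySem.List.mem_dedup _ _).mp hw
        obtain ⟨a, ha, rfl⟩ := List.mem_map.mp hwmem
        have hwgt : p.1 < a.1 := hrgt a ha
        have hfilt_tail : (p :: rest).filter (fun q => q.1 == a.1)
            = (rest.dropWhile (fun q => q.1 == p.1)).filter (fun q => q.1 == a.1) := by
          rw [List.filter_cons]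
          have hb : (p.1 == a.1) = false := by simpa using ne_of_lt hwgt
          simp only [hb, Bool.false_eq_true, if_false]
          conv_lhs => rw [← List.takeWhile_append_dropWhile (p := fun q => q.1 == p.1) (l := rest)]
          rw [List.filter_append,
              List.filter_eq_nil_iff.mpr (fun b hb' => by
                have hbp := htmem b hb'
                rw [hbp]
                simpa using ne_of_lt hwgt),
              List.nil_append]
        rw [hfilt_tail]

lemma pvGroupAdj_eq (s : List (String × Int)) (hs : s.Pairwise (fun a b => a.1 ≤ b.1)) :
    pvGroupAdj s
      = (PySem.List.dedup (s.map Prod.fst)).map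
          (fun w => (w, (s.filter (fun p => p.1 == w)).map Prod.snd)) :=
  pvGroupAdj_eq_aux s.length s le_rfl hs

-- ===== VERDICT (by name: the statement is the Claim_ definition above) =====
theorem shuffle_and_sort_spec : Claim_equal_shuffle_and_sort := by
  intro xs _
  unfold Spec_shuffle_and_sort shuffle_and_sort shuffle_and_sort_alt
  rw [pvStepA_eq]
  set s := PySem.List.sorted xs (fun p : String × Int => p.1) with hsdef
  have hsp : s.Pairwise (fun a b => a.1 ≤ b.1) := PySem.List.sorted_pairwise xs _
  have hB : pvGroupAdj s
      = (PySem.List.dedup (s.map Prod.fst)).map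
          (fun w => (w, (xs.filter (fun p => p.1 == w)).map Prod.snd)) := by
    rw [pvGroupAdj_eq s hsp]
    exact List.map_congr_left (fun w _ => by rw [hsdef, pvFilter_sorted])
  rw [hB]
  show PySem.List.sorted (xs.foldl pvStep PySem.Dict.empty).items (fun it => it.1)
      = (PySem.List.dedup (s.map Prod.fst)).map
          (fun w => (w, (xs.filter (fun p => p.1 == w)).map Prod.snd))
  refine PySem.List.sorted_eq_of_perm_of_pairwise_lt
      ((xs.foldl pvStep PySem.Dict.empty).items)
      ((PySem.List.dedup (s.map Prod.fst)).map
        (fun w => (w, (xs.filter (fun p => p.1 == w)).map Prod.snd)))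
      (fun it => it.1) ?_ ?_
  · rw [pvItemsG]
    refine List.Perm.map _ ?_
    refine (List.perm_ext_iff_of_nodup ?_ ?_).mpr ?_
    · exact PySem.List.nodup_dedup _
    · exact PySem.List.nodup_dedup _
    · intro a
      simp only [PySem.List.mem_dedup, List.mem_map]
      constructor
      · rintro ⟨p, hp, rfl⟩
        exact ⟨p, (PySem.List.mem_sorted _ _ _ _).1 hp, rfl⟩
      · rintro ⟨p, hp, rfl⟩
        exact ⟨p, (PySem.List.mem_sorted _ _ _ _).2 hp, rfl⟩
  · have h1 : (s.map Prod.fst).Pairwise (· ≤ ·) := by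
      rw [List.pairwise_map]; exact hsp
    have h2 := pvPairwise_lt_dedup _ h1
    rw [List.pairwise_map]
    simpa using h2
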